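-- pv_equiv track=rewrite | github.com/jcolinpatrick/kryptos | scripts/tableau/e_webster_02_bespoke_methods.py | route_cipher_col_serpentine
-- ===== SOURCE A (Python) =====
-- def route_cipher_col_serpentine(text: str, nrows: int, ncols: int) -> str:
--     """Column-first serpentine: read columns, alternating top-down/bottom-up."""
--     n = len(text)
--     if nrows * ncols < n:
--         return text
--
--     grid = [['' for _ in range(ncols)] for _ in range(nrows)]
--     idx = 0
--     for r in range(nrows):
--         for c in range(ncols):
--             if idx < n:
--                 grid[r][c] = text[idx]
--                 idx += 1
--
--     result = []
--     for c in range(ncols):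
--         if c % 2 == 0:
--             for r in range(nrows):
--                 if grid[r][c]:
--                     result.append(grid[r][c])
--         else:
--             for r in range(nrows - 1, -1, -1):
--                 if grid[r][c]:
--                     result.append(grid[r][c])
--     return ''.join(result[:n])
-- ===== SOURCE B (Python) =====
-- def route_cipher_col_serpentine(text: str, nrows: int, ncols: int) -> str:
--     """Column-first serpentine read computed directly from filled-cell indices:
--     column c holds exactly the characters text[c], text[c+ncols], ... — no grid."""
--     n = len(text)
--     if nrows * ncols < n:
--         return text
--     out = []
--     for c in range(ncols):
--         col = [text[i] for i in range(c, n, ncols)]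
--         if c % 2:
--             col.reverse()
--         out += col
--     return ''.join(out)
-- ===== Notes on version B (the rewrite author's own statement) =====
-- stated objective: faster
-- what changed: B reads each serpentine column directly from the arithmetic index sequence range(c, n, ncols) of filled cells, instead of materializing and scanning an nrows-by-ncols grid.
import Mathlib
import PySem

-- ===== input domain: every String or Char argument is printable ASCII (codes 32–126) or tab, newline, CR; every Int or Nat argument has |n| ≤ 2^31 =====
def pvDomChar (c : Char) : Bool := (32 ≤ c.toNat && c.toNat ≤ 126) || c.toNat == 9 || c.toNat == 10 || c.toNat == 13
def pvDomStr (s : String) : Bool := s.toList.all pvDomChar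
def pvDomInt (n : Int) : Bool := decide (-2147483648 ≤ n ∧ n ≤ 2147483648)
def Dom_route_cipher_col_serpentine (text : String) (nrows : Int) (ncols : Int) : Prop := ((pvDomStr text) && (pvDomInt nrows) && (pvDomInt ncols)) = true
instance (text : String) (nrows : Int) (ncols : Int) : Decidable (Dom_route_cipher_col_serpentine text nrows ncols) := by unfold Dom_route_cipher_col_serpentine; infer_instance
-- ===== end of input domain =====

-- B builds each serpentine column directly from the index sequence range(c, n, ncols); no grid (objective: faster).

-- ===== PORT A =====
-- Python's mutable grid of '' / one-char cells is modelled as a function Int → Int → Option Char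
-- (none = the '' placeholder), updated pointwise exactly where A assigns grid[r][c].
def pvFillStep (s : List Char) (r : Int) (st : (Int → Int → Option Char) × Int) (c : Int) :
    (Int → Int → Option Char) × Int :=
  if st.2 < (s.length : Int) then
    (fun r' c' => if r' = r ∧ c' = c then PySem.List.pyGet? s st.2 else st.1 r' c', st.2 + 1)
  else st

def pvFill (s : List Char) (nrows ncols : Int) : (Int → Int → Option Char) × Int :=
  (PySem.List.pyRange 0 nrows 1).foldl
    (fun st r => (PySem.List.pyRange 0 ncols 1).foldl (pvFillStep s r) st)
    ((fun _ _ => none), 0)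

-- result.append(grid[r][c]) guarded by `if grid[r][c]:`
def pvAppendCell (grid : Int → Int → Option Char) (c : Int) (res : List Char) (r : Int) : List Char :=
  match grid r c with
  | some ch => res ++ [ch]
  | none => res

def pvReadCols (grid : Int → Int → Option Char) (nrows ncols : Int) : List Char :=
  (PySem.List.pyRange 0 ncols 1).foldl
    (fun res c =>
      if PySem.Int.mod c 2 = 0 then
        (PySem.List.pyRange 0 nrows 1).foldl (pvAppendCell grid c) res
      else
        (PySem.List.pyRange (nrows - 1) (-1) (-1)).foldl (pvAppendCell grid c) res)
    []

def route_cipher_col_serpentine (text : String) (nrows : Int) (ncols : Int) : String :=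
  let s := text.toList
  let n : Int := s.length
  if nrows * ncols < n then text
  else
    let result := pvReadCols (pvFill s nrows ncols).1 nrows ncols
    -- ''.join(result[:n])
    String.ofList (PySem.Chars.join [] ((PySem.List.slice result none (some n)).map (fun ch => [ch])))

-- ===== PORT B =====
-- col = [text[i] for i in range(c, n, ncols)]  (indices are in range: pyGetD's default is never read)
def pvColChars (s : List Char) (ncols c : Int) : List Char :=
  (PySem.List.pyRange c (s.length : Int) ncols).map (fun i => PySem.List.pyGetD s i ' ')

-- if c % 2: col.reverse()
def pvSerpCol (s : List Char) (ncols c : Int) : List Char :=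
  if ¬ PySem.Int.mod c 2 = 0 then (pvColChars s ncols c).reverse else pvColChars s ncols c

def route_cipher_col_serpentine_alt (text : String) (nrows : Int) (ncols : Int) : String :=
  let s := text.toList
  let n : Int := s.length
  if nrows * ncols < n then text
  else
    let out := (PySem.List.pyRange 0 ncols 1).foldl (fun out c => out ++ pvSerpCol s ncols c) []
    String.ofList (PySem.Chars.join [] (out.map (fun ch => [ch])))

-- ===== PRECONDITION & SPEC =====
def Spec_route_cipher_col_serpentine (text : String) (nrows : Int) (ncols : Int) (out : String) : Prop := out = route_cipher_col_serpentine_alt text nrows ncols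
instance (text : String) (nrows : Int) (ncols : Int) (out : String) : Decidable (Spec_route_cipher_col_serpentine text nrows ncols out) := by unfold Spec_route_cipher_col_serpentine; infer_instance

-- ===== CLAIM (what is proved, stated in full; the proofs are below) =====
def Claim_equal_route_cipher_col_serpentine : Prop := ∀ (text : String) (nrows : Int) (ncols : Int), Dom_route_cipher_col_serpentine text nrows ncols → Spec_route_cipher_col_serpentine text nrows ncols (route_cipher_col_serpentine text nrows ncols)

-- ===== LEMMAS AND PROOFS =====

lemma pvGet_eq (s : List Char) (i : Int) (h0 : 0 ≤ i) (h1 : i < (s.length : Int)) :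
    PySem.List.pyGet? s i = some (PySem.List.pyGetD s i ' ') := by
  have hk : i.toNat < s.length := by omega
  simp [PySem.List.pyGet?, PySem.List.pyGetD, PySem.List.pyIdx?, h0, h1,
    List.getElem?_eq_getElem, hk]

-- one row of A's fill loop
lemma pvFillRow (s : List Char) (r i0 : Int) (g : Int → Int → Option Char) (m : Nat)
    (h0 : 0 ≤ i0) (h1 : i0 ≤ (s.length : Int)) :
    ((PySem.List.pyRange 0 (m : Int) 1).foldl (pvFillStep s r) (g, i0)).2
        = min (s.length : Int) (i0 + m) ∧
      ∀ r' c', ((PySem.List.pyRange 0 (m : Int) 1).foldl (pvFillStep s r) (g, i0)).1 r' c'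
        = if r' = r ∧ 0 ≤ c' ∧ c' < (m : Int) ∧ i0 + c' < (s.length : Int)
          then PySem.List.pyGet? s (i0 + c') else g r' c' := by
  induction m with
  | zero =>
      rw [show ((0 : Nat) : Int) = 0 by norm_num, PySem.List.pyRange_one_eq_nil (by omega)]
      refine ⟨by simp; omega, ?_⟩
      intro r' c'
      simp only [List.foldl_nil]
      rw [if_neg (by omega)]
  | succ m ih =>
      obtain ⟨ih1, ih2⟩ := ih
      rw [show ((m + 1 : Nat) : Int) = (m : Int) + 1 by push_cast; ring,
        PySem.List.pyRange_one_succ_right (by positivity), List.foldl_append,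
        List.foldl_cons, List.foldl_nil]
      set F := (PySem.List.pyRange 0 (m : Int) 1).foldl (pvFillStep s r) (g, i0) with hF
      rw [show F = (F.1, F.2) from rfl]
      simp only [pvFillStep, ih1]
      by_cases hlt : min (s.length : Int) (i0 + (m : Int)) < (s.length : Int)
      · rw [if_pos hlt]
        refine ⟨by omega, ?_⟩
        intro r' c'
        have hmin : min (s.length : Int) (i0 + (m : Int)) = i0 + (m : Int) := by omega
        show (if r' = r ∧ c' = (m : Int) then _ else F.1 r' c') = _
        by_cases hrc : r' = r ∧ c' = (m : Int)
        · rw [if_pos hrc, hmin, if_pos (by obtain ⟨ha, hb⟩ := hrc; subst hb; exact ⟨ha, by positivity, by omega, by omega⟩), hrc.2]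
        · rw [if_neg hrc, ih2]
          by_cases ht : r' = r ∧ 0 ≤ c' ∧ c' < (m : Int) ∧ i0 + c' < (s.length : Int)
          · rw [if_pos ht, if_pos ⟨ht.1, ht.2.1, by omega, ht.2.2.2⟩]
          · rw [if_neg ht, if_neg (by rintro ⟨ha, hb, hcx, hd⟩; exact ht ⟨ha, hb, by omega, hd⟩)]
      · rw [if_neg hlt]
        refine ⟨by omega, ?_⟩
        intro r' c'
        show F.1 r' c' = _
        rw [ih2]
        by_cases ht : r' = r ∧ 0 ≤ c' ∧ c' < (m : Int) ∧ i0 + c' < (s.length : Int)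
        · rw [if_pos ht, if_pos ⟨ht.1, ht.2.1, by omega, ht.2.2.2⟩]
        · rw [if_neg ht, if_neg ?_]
          rintro ⟨ha, hb, hcx, hd⟩
          -- c' = m would force i0 + c' < len, contradicting hlt being false
          refine ht ⟨ha, hb, by omega, hd⟩

-- the whole fill loop: grid r c = text[r*ncols+c] exactly on filled cells
lemma pvFillAll (s : List Char) (ncols : Int) (hc : 0 < ncols) (m : Nat) :
    ((PySem.List.pyRange 0 (m : Int) 1).foldl
        (fun st r => (PySem.List.pyRange 0 ncols 1).foldl (pvFillStep s r) st)
        ((fun _ _ => none), 0)).2 = min (s.length : Int) ((m : Int) * ncols) ∧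
      ∀ r c, ((PySem.List.pyRange 0 (m : Int) 1).foldl
        (fun st r => (PySem.List.pyRange 0 ncols 1).foldl (pvFillStep s r) st)
        ((fun _ _ => none), 0)).1 r c
        = if 0 ≤ r ∧ r < (m : Int) ∧ 0 ≤ c ∧ c < ncols ∧ r * ncols + c < (s.length : Int)
          then PySem.List.pyGet? s (r * ncols + c) else none := by
  induction m with
  | zero =>
      rw [show ((0 : Nat) : Int) = 0 by norm_num, PySem.List.pyRange_one_eq_nil (le_refl (0 : Int))]
      refine ⟨by simp, ?_⟩
      intro r c
      simp only [List.foldl_nil]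
      rw [if_neg (by omega)]
  | succ m ih =>
      obtain ⟨ih1, ih2⟩ := ih
      rw [show ((m + 1 : Nat) : Int) = (m : Int) + 1 by push_cast; ring,
        PySem.List.pyRange_one_succ_right (by positivity), List.foldl_append,
        List.foldl_cons, List.foldl_nil]
      set F := (PySem.List.pyRange 0 (m : Int) 1).foldl
        (fun st r => (PySem.List.pyRange 0 ncols 1).foldl (pvFillStep s r) st)
        ((fun _ _ => (none : Option Char)), (0 : Int)) with hF
      have hcN : (0 : Int) ≤ (m : Int) * ncols := by positivity
      have h0 : 0 ≤ F.2 := by rw [ih1]; omega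
      have h1 : F.2 ≤ (s.length : Int) := by rw [ih1]; omega
      have hrow := pvFillRow s (m : Int) F.2 F.1 ncols.toNat h0 h1
      rw [show ((ncols.toNat : Int)) = ncols from Int.toNat_of_nonneg hc.le] at hrow
      obtain ⟨hr1, hr2⟩ := hrow
      have hmul : ((m : Int) + 1) * ncols = (m : Int) * ncols + ncols := by ring
      constructor
      · show ((PySem.List.pyRange 0 ncols 1).foldl (pvFillStep s (m : Int)) F).2 = _
        rw [show F = (F.1, F.2) from rfl] at hr1 ⊢
        rw [hr1, ih1, hmul]
        have := hc
        generalize (m : Int) * ncols = P at *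
        omega
      · intro r c
        show ((PySem.List.pyRange 0 ncols 1).foldl (pvFillStep s (m : Int)) F).1 r c = _
        rw [show F = (F.1, F.2) from rfl] at hr2 ⊢
        rw [hr2, ih1, ih2]
        by_cases hr : r = (m : Int)
        · subst hr
          by_cases hfill : (m : Int) * ncols < (s.length : Int)
          · have hm2 : min (s.length : Int) ((m : Int) * ncols) = (m : Int) * ncols := by omega
            rw [hm2]
            by_cases ht : 0 ≤ c ∧ c < ncols ∧ (m : Int) * ncols + c < (s.length : Int)
            · rw [if_pos ⟨rfl, ht.1, ht.2.1, ht.2.2⟩,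
                if_pos ⟨by positivity, by omega, ht.1, ht.2.1, ht.2.2⟩]
            · rw [if_neg (by rintro ⟨-, hb, hcx, hd⟩; exact ht ⟨hb, hcx, hd⟩),
                if_neg (by rintro ⟨-, -, hb, hcx, hd⟩; exact ht ⟨hb, hcx, hd⟩),
                if_neg (by omega)]
          · have hm2 : min (s.length : Int) ((m : Int) * ncols) = (s.length : Int) := by omega
            rw [hm2]
            rw [if_neg (by rintro ⟨-, hb, hcx, hd⟩; omega),
              if_neg (by
                rintro ⟨-, -, hb, hcx, hd⟩
                have : 0 ≤ c := hb
                nlinarith), if_neg (by omega)]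
        · rw [if_neg (by rintro ⟨ha, -⟩; exact hr ha)]
          by_cases ht : 0 ≤ r ∧ r < (m : Int) ∧ 0 ≤ c ∧ c < ncols ∧ r * ncols + c < (s.length : Int)
          · rw [if_pos ht, if_pos ⟨ht.1, by omega, ht.2.2⟩]
          · rw [if_neg ht, if_neg (by rintro ⟨ha, hb, hcx⟩; exact ht ⟨ha, by omega, hcx⟩)]

lemma pvAppendCell_eq_if (grid : Int → Int → Option Char) (c : Int) (res : List Char) (r : Int) :
    pvAppendCell grid c res r
      = if (grid r c).isSome then res ++ [(grid r c).getD ' '] else res := by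
  rcases h : grid r c with _ | ch <;> simp [pvAppendCell, h]

lemma pvFoldlAppendCell (grid : Int → Int → Option Char) (c : Int) (l : List Int) (res0 : List Char) :
    l.foldl (pvAppendCell grid c) res0
      = res0 ++ (l.filter (fun r => (grid r c).isSome)).map (fun r => (grid r c).getD ' ') := by
  rw [PySem.List.foldl_congr_mem l (pvAppendCell grid c)
      (fun res r => if (grid r c).isSome then res ++ [(grid r c).getD ' '] else res) res0
      (fun acc r _ => pvAppendCell_eq_if grid c acc r),
    PySem.List.foldl_append_if]

-- the number K of filled rows of column c, and its characterization
lemma pvColCount (s : List Char) (nrows ncols c : Int) (hc : 0 < ncols) (hr : 0 ≤ nrows)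
    (hcc : 0 ≤ c) (hcn : c < ncols) (hN : (s.length : Int) ≤ nrows * ncols) :
    let K : Int := if c < (s.length : Int) then ((s.length : Int) - c + ncols - 1) / ncols else 0
    0 ≤ K ∧ K ≤ nrows ∧ ∀ r : Int, 0 ≤ r → (r * ncols + c < (s.length : Int) ↔ r < K) := by
  intro K
  by_cases hcltn : c < (s.length : Int)
  · have hKdef : K = ((s.length : Int) - c + ncols - 1) / ncols := if_pos hcltn
    have hK0 : 0 ≤ K := by
      rw [hKdef]
      exact Int.ediv_nonneg (by linarith) hc.le
    have hKn : K ≤ nrows := by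
      by_contra hlt
      push_neg at hlt
      have : nrows + 1 ≤ K := by omega
      rw [hKdef, Int.le_ediv_iff_mul_le hc] at this
      nlinarith
    refine ⟨hK0, hKn, ?_⟩
    intro r hr
    constructor
    · intro h
      have : r + 1 ≤ K := by
        rw [hKdef, Int.le_ediv_iff_mul_le hc]
        nlinarith
      omega
    · intro h
      have : r + 1 ≤ K := by omega
      rw [hKdef, Int.le_ediv_iff_mul_le hc] at this
      nlinarith
  · have hKdef : K = 0 := if_neg hcltn
    refine ⟨by omega, by omega, ?_⟩
    intro r hr2
    have hrc0 : 0 ≤ r * ncols := by positivity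
    have hge : (s.length : Int) ≤ c := by omega
    rw [hKdef]
    constructor
    · intro h; exfalso; linarith
    · intro h; exact absurd h (by omega)
-- here r < 0 contradicts hr2

-- A's per-column scan produces exactly B's index-sequence column
lemma pvColMap (s : List Char) (nrows ncols c : Int) (hc : 0 < ncols) (hr : 0 ≤ nrows)
    (hcc : 0 ≤ c) (hcn : c < ncols) (hN : (s.length : Int) ≤ nrows * ncols)
    (grid : Int → Int → Option Char)
    (hg : ∀ r c', grid r c'
      = if 0 ≤ r ∧ r < nrows ∧ 0 ≤ c' ∧ c' < ncols ∧ r * ncols + c' < (s.length : Int)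
        then PySem.List.pyGet? s (r * ncols + c') else none) :
    ((PySem.List.pyRange 0 nrows 1).filter (fun r => (grid r c).isSome)).map
        (fun r => (grid r c).getD ' ')
      = pvColChars s ncols c := by
  obtain ⟨hK0, hKn, hKiff⟩ := pvColCount s nrows ncols c hc hr hcc hcn hN
  set K : Int := if c < (s.length : Int) then ((s.length : Int) - c + ncols - 1) / ncols else 0 with hKdef
  have hsome : ∀ r : Int, 0 ≤ r → r < nrows → ((grid r c).isSome = decide (r < K)) := by
    intro r h0 h1
    rw [hg]
    by_cases ht : r < K
    · have hlt := (hKiff r h0).2 ht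
      rw [if_pos ⟨h0, h1, hcc, hcn, hlt⟩, pvGet_eq s _ (by positivity) hlt]
      simp [ht]
    · rw [if_neg (by rintro ⟨-, -, -, -, h5⟩; exact ht ((hKiff r h0).1 h5))]; simp [ht]
  rw [List.filter_congr (fun r hrm => by
      obtain ⟨h0, h1⟩ := (PySem.List.mem_pyRange_one).1 hrm
      exact hsome r h0 h1)]
  rw [PySem.List.pyRange_one_append 0 K nrows hK0 hKn, List.filter_append]
  rw [List.filter_eq_self.2 (fun r hrm => by
      obtain ⟨h0, h1⟩ := (PySem.List.mem_pyRange_one).1 hrm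
      simpa using h1)]
  rw [List.filter_eq_nil_iff.2 (fun r hrm => by
      obtain ⟨h0, h1⟩ := (PySem.List.mem_pyRange_one).1 hrm
      simpa using h0), List.append_nil]
  have hmc : ((PySem.List.pyRange 0 K 1).map (fun r => (grid r c).getD ' '))
      = (PySem.List.pyRange 0 K 1).map (fun r => PySem.List.pyGetD s (r * ncols + c) ' ') :=
    List.map_congr_left (fun r hrm => by
      obtain ⟨h0, h1⟩ := (PySem.List.mem_pyRange_one).1 hrm
      have hlt : r * ncols + c < (s.length : Int) := (hKiff r h0).2 h1
      rw [hg, if_pos ⟨h0, by omega, hcc, hcn, hlt⟩,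
        pvGet_eq s _ (by positivity) hlt, Option.getD_some])
  rw [hmc]
  -- both sides are maps over List.range K.toNat
  unfold pvColChars
  have hKK : (if c < (s.length : Int) then (((s.length : Int) - c + ncols - 1) / ncols).toNat else 0)
      = (K - 0).toNat := by
    rw [hKdef]; split_ifs <;> omega
  rw [PySem.List.pyRange_of_pos c (s.length : Int) hc, PySem.List.pyRange_one, List.map_map,
    List.map_map, hKK]
  refine List.map_congr_left (fun k _ => ?_)
  show PySem.List.pyGetD s ((0 + (k : Int)) * ncols + c) ' ' = PySem.List.pyGetD s (c + ncols * k) ' '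
  congr 1
  ring

-- A's whole read phase equals B's flatMap of serpentine columns
lemma pvReadEq (s : List Char) (nrows ncols : Int) (hc : 0 < ncols) (hr : 0 ≤ nrows)
    (hN : (s.length : Int) ≤ nrows * ncols)
    (grid : Int → Int → Option Char)
    (hg : ∀ r c', grid r c'
      = if 0 ≤ r ∧ r < nrows ∧ 0 ≤ c' ∧ c' < ncols ∧ r * ncols + c' < (s.length : Int)
        then PySem.List.pyGet? s (r * ncols + c') else none) :
    pvReadCols grid nrows ncols
      = (PySem.List.pyRange 0 ncols 1).flatMap (pvSerpCol s ncols) := by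
  unfold pvReadCols
  rw [PySem.List.foldl_congr_mem _ _ (fun res c => res ++ pvSerpCol s ncols c) [] ?_,
    PySem.List.foldl_append_eq_flatMap, List.nil_append]
  intro res c hcm
  obtain ⟨hc0, hc1⟩ := (PySem.List.mem_pyRange_one).1 hcm
  have hmap := pvColMap s nrows ncols c hc hr hc0 hc1 hN grid hg
  show _ = res ++ pvSerpCol s ncols c
  unfold pvSerpCol
  by_cases hmod : PySem.Int.mod c 2 = 0
  · rw [if_pos hmod, pvFoldlAppendCell, hmap, if_neg (not_not_intro hmod)]
  · rw [if_neg hmod,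
      show PySem.List.pyRange (nrows - 1) (-1) (-1) = (PySem.List.pyRange 0 nrows 1).reverse from by
        have := PySem.List.pyRange_neg_one_eq_reverse (nrows - 1) (-1)
        simpa using this,
      pvFoldlAppendCell, List.filter_reverse, List.map_reverse, hmap, if_pos hmod]

-- the serpentine output has exactly as many characters as indices; its indices are distinct and < n
lemma pvOutLen (s : List Char) (ncols : Int) (hc : 0 < ncols) :
    ((PySem.List.pyRange 0 ncols 1).flatMap (pvSerpCol s ncols)).length ≤ (s.length : Int).toNat := by
  have hlen1 : ∀ c : Int, (pvSerpCol s ncols c).length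
      = (PySem.List.pyRange c (s.length : Int) ncols).length := by
    intro c
    unfold pvSerpCol pvColChars
    split_ifs <;> simp
  have hstep : ((PySem.List.pyRange 0 ncols 1).flatMap (pvSerpCol s ncols)).length
      = ((PySem.List.pyRange 0 ncols 1).flatMap
          (fun c => PySem.List.pyRange c (s.length : Int) ncols)).length := by
    rw [List.length_flatMap, List.length_flatMap]
    exact congrArg List.sum (List.map_congr_left (fun c _ => hlen1 c))
  rw [hstep]
  have hnodup : ((PySem.List.pyRange 0 ncols 1).flatMap
      (fun c => PySem.List.pyRange c (s.length : Int) ncols)).Nodup := by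
    rw [List.nodup_flatMap]
    constructor
    · intro c _
      rw [PySem.List.pyRange_of_pos c (s.length : Int) hc]
      refine List.Nodup.map ?_ (List.nodup_range)
      intro a b hab
      simp only at hab
      have : ncols * (a : Int) = ncols * (b : Int) := by omega
      have := Int.eq_of_mul_eq_mul_left (by omega) this
      exact_mod_cast this
    · refine (PySem.List.pairwise_lt_pyRange_one 0 ncols).imp_of_mem ?_
      intro c c' hcm hcm' hlt'
      obtain ⟨hc0, hc1⟩ := (PySem.List.mem_pyRange_one).1 hcm
      obtain ⟨hc0', hc1'⟩ := (PySem.List.mem_pyRange_one).1 hcm'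
      intro x hx hx'
      obtain ⟨-, -, hd⟩ := (PySem.List.mem_pyRange_iff_of_pos hc x).1 hx
      obtain ⟨-, -, hd'⟩ := (PySem.List.mem_pyRange_iff_of_pos hc x).1 hx'
      have hdvd : ncols ∣ c' - c := by
        have := Int.dvd_sub hd hd'
        simpa [sub_sub_sub_cancel_left] using this
      have := Int.eq_zero_of_abs_lt_dvd hdvd (by rw [abs_of_pos (by omega)]; omega)
      omega
  have hsub : ((PySem.List.pyRange 0 ncols 1).flatMap
      (fun c => PySem.List.pyRange c (s.length : Int) ncols))
      ⊆ PySem.List.pyRange 0 (s.length : Int) 1 := by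
    intro x hx
    rw [List.mem_flatMap] at hx
    obtain ⟨c, hcm, hxm⟩ := hx
    obtain ⟨hc0, hc1⟩ := (PySem.List.mem_pyRange_one).1 hcm
    obtain ⟨ha, hb, -⟩ := (PySem.List.mem_pyRange_iff_of_pos hc x).1 hxm
    exact (PySem.List.mem_pyRange_one).2 ⟨by omega, hb⟩
  have := (hnodup.subperm hsub).length_le
  rw [PySem.List.length_pyRange_one] at this
  omega

-- ===== VERDICT (by name: the statement is the Claim_ definition above) =====
theorem route_cipher_col_serpentine_spec : Claim_equal_route_cipher_col_serpentine := by
  unfold Claim_equal_route_cipher_col_serpentine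
  intro text nrows ncols _dom
  unfold Spec_route_cipher_col_serpentine
  unfold route_cipher_col_serpentine route_cipher_col_serpentine_alt
  set s := text.toList with hs
  by_cases hsmall : nrows * ncols < (s.length : Int)
  · simp only [if_pos hsmall]
  · simp only [if_neg hsmall]
    push_neg at hsmall
    by_cases hc : ncols ≤ 0
    · rw [PySem.List.pyRange_one_eq_nil hc]
      unfold pvReadCols
      rw [PySem.List.pyRange_one_eq_nil hc]
      simp only [List.foldl_nil]
      rw [PySem.List.slice_to _ (show (0 : Int) ≤ ((s.length : Int)) by omega)]
      simp
    · push_neg at hc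
      have hr : 0 ≤ nrows := by
        by_contra hneg
        push_neg at hneg
        have h1 : nrows * ncols < 0 := mul_neg_of_neg_of_pos hneg hc
        have h2 : (0 : Int) ≤ (s.length : Int) := by omega
        linarith
      have hfill := pvFillAll s ncols hc nrows.toNat
      rw [show ((nrows.toNat : Int)) = nrows from Int.toNat_of_nonneg hr] at hfill
      have hg : ∀ r c', (pvFill s nrows ncols).1 r c'
          = if 0 ≤ r ∧ r < nrows ∧ 0 ≤ c' ∧ c' < ncols ∧ r * ncols + c' < (s.length : Int)
            then PySem.List.pyGet? s (r * ncols + c') else none := hfill.2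
      rw [pvReadEq s nrows ncols hc hr hsmall _ hg,
        PySem.List.foldl_append_eq_flatMap, List.nil_append,
        PySem.List.slice_to _ (show (0 : Int) ≤ ((s.length : Int)) by omega),
        List.take_of_length_le (pvOutLen s ncols hc)]
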